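-- pv_equiv track=rewrite | github.com/indigoMac/adventOfCode | day_9/day_9.py | compact_disk
-- ===== SOURCE A (Python) =====
-- def compact_disk(disk_blocks):
--     """
--     Compacts the disk blocks by moving each file block from the end to the leftmost free space.
--
--     Returns the final state of the disk after compaction.
--     """
--     for i in range(len(disk_blocks) - 1, -1, -1):
--         if disk_blocks[i] != '.':
--             for j in range(len(disk_blocks)):
--                 if disk_blocks[j] == '.':
--                     disk_blocks[j] = disk_blocks[i]
--                     disk_blocks[i] = '.'
--                     continue
--                 if j >= i:
--                     return disk_blocks
-- ===== SOURCE B (Python) =====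
-- def compact_disk(disk_blocks):
--     """
--     Compacts the disk blocks by moving each file block from the end to the leftmost free space.
--
--     Returns the final state of the disk after compaction.
--     """
--     left, right = 0, len(disk_blocks) - 1
--     while left < right:
--         if disk_blocks[left] != '.':
--             left += 1
--         elif disk_blocks[right] == '.':
--             right -= 1
--         else:
--             disk_blocks[left], disk_blocks[right] = disk_blocks[right], disk_blocks[left]
--             left += 1
--             right -= 1
--     return disk_blocks
-- ===== Notes on version B (the rewrite author's own statement) =====
-- stated objective: alternative
-- what changed: Replaced the nested-loop scheme (for each file block from the right, rescan the whole disk from index 0 for the leftmost gap) with a single two-pointer sweep: the left pointer seeks the next gap, the right pointer seeks the next file block, and they swap until the pointers cross.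
-- intended difference: On disks with no file block at all (every element '.', including the empty list) A falls off its outer loop and returns None, while B returns the disk unchanged, which is the documented 'final state of the disk after compaction'. — e.g. on compact_disk(["."]): A returns none, B returns some ["."]
import Mathlib
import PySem

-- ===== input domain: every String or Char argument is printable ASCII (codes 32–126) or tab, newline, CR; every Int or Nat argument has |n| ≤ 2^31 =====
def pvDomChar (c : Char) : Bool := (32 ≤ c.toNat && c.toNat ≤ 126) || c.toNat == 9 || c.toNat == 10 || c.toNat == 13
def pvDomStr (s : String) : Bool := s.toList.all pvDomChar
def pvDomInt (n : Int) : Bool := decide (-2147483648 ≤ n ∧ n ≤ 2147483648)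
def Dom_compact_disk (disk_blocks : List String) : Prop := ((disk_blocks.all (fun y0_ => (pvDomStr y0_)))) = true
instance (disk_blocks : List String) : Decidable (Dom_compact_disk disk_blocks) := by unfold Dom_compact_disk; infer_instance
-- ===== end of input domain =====

-- B replaces A's nested loops (for each file block from the right, rescan from index 0
-- for the leftmost gap) by a single two-pointer sweep.  Both Pythons mutate the input
-- list in place; the equivalence proved here is about the RETURN value only.

-- ===== PORT A =====
-- Python's inner `for j in range(len(disk_blocks))`: .inl db = loop fell through (outer
-- loop continues with mutated db), .inr db = `return disk_blocks` was executed.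
def pvInnerA (i : Nat) : List String → List Nat → (List String) ⊕ (List String)
  | db, [] => .inl db
  | db, j :: js =>
    if db.getD j "" = "." then
      pvInnerA i ((db.set j (db.getD i "")).set i ".") js
    else if i ≤ j then .inr db
    else pvInnerA i db js

-- Python's outer `for i in range(len(disk_blocks)-1, -1, -1)`; falling off returns None.
def pvOuterA : List String → List Nat → Option (List String)
  | _, [] => none
  | db, i :: is =>
    if db.getD i "" ≠ "." then
      match pvInnerA i db (List.range db.length) with
      | .inl db' => pvOuterA db' is
      | .inr r => some r
    else pvOuterA db is

-- range(n-1, -1, -1) = [n-1, n-2, …, 0]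
def pvRevRange : Nat → List Nat
  | 0 => []
  | m + 1 => m :: pvRevRange m

def compact_disk (disk_blocks : List String) : Option (List String) :=
  pvOuterA disk_blocks (pvRevRange disk_blocks.length)

-- ===== PORT B =====
-- the `while left < right` loop of Source B (list indices stay in range; getD reads them)
def pvAltLoop (db : List String) (l r : Nat) : List String :=
  if h : l < r then
    if db.getD l "" ≠ "." then pvAltLoop db (l + 1) r
    else if db.getD r "" = "." then pvAltLoop db l (r - 1)
    else pvAltLoop ((db.set l (db.getD r "")).set r (db.getD l "")) (l + 1) (r - 1)
  else db
termination_by r - l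
decreasing_by all_goals omega

def compact_disk_alt (disk_blocks : List String) : Option (List String) :=
  some (pvAltLoop disk_blocks 0 (disk_blocks.length - 1))

-- ===== PRECONDITION & SPEC =====
-- On disks with no file block (every element ".", including []) A falls off its outer loop
-- and returns None, while B returns the disk unchanged — the documented "final state of
-- the disk after compaction".
def D_compact_disk (disk_blocks : List String) : Prop := ∀ b ∈ disk_blocks, b = "."
instance (disk_blocks : List String) : Decidable (D_compact_disk disk_blocks) := by
  unfold D_compact_disk; infer_instance

def Spec_compact_disk (disk_blocks : List String) (out : Option (List String)) : Prop :=
  ¬ D_compact_disk disk_blocks → out = compact_disk_alt disk_blocks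
instance (disk_blocks : List String) (out : Option (List String)) :
    Decidable (Spec_compact_disk disk_blocks out) := by
  unfold Spec_compact_disk; infer_instance

def pvDiffWitness_compact_disk : List String := ["."]
def pvDiffWitnessOut_compact_disk : (Option (List String)) × (Option (List String)) :=
  (none, some ["."])

-- ===== CLAIM (what is proved, stated in full; the proofs are below) =====
def Claim_unchanged_compact_disk : Prop := ∀ (disk_blocks : List String),
  Dom_compact_disk disk_blocks → Spec_compact_disk disk_blocks (compact_disk disk_blocks)
def Claim_changed_compact_disk : Prop :=
  Dom_compact_disk (pvDiffWitness_compact_disk) ∧ D_compact_disk (pvDiffWitness_compact_disk) ∧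
  compact_disk (pvDiffWitness_compact_disk) = pvDiffWitnessOut_compact_disk.1 ∧
  compact_disk_alt (pvDiffWitness_compact_disk) = pvDiffWitnessOut_compact_disk.2 ∧
  pvDiffWitnessOut_compact_disk.1 ≠ pvDiffWitnessOut_compact_disk.2
def Claim_exact_compact_disk : Prop := ∀ (disk_blocks : List String),
  Dom_compact_disk disk_blocks → D_compact_disk disk_blocks →
  compact_disk disk_blocks ≠ compact_disk_alt disk_blocks

-- ===== LEMMAS AND PROOFS =====

-- set is a no-op when the value is already there
theorem pv_set_self (db : List String) (j : Nat) (v : String) (h : db.getD j "" = v)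
    (hr : j < db.length) : db.set j v = db := by
  subst h
  rw [List.getD_eq_getElem?_getD, List.getElem?_eq_getElem hr, Option.getD_some]
  exact List.set_getElem_self hr

-- L1: the left pointer climbs over file blocks
theorem pvAlt_climb (db : List String) (r : Nat) :
    ∀ (d : Nat) (l : Nat), l + d ≤ r → (∀ k, l ≤ k → k < l + d → db.getD k "" ≠ ".") →
      pvAltLoop db l r = pvAltLoop db (l + d) r := by
  intro d
  induction d with
  | zero => intro l _ _; rfl
  | succ d ih =>
    intro l hle hfiles
    rw [pvAltLoop]
    have hlr : l < r := by omega
    rw [dif_pos hlr, if_pos (hfiles l le_rfl (by omega))]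
    have := ih (l + 1) (by omega) (fun k hk hk' => hfiles k (by omega) (by omega))
    rw [(by omega : l + (d + 1) = l + 1 + d)]
    exact this

-- L3: all dots in [l, r] → loop returns db
theorem pvAlt_dots (db : List String) :
    ∀ (d : Nat) (l r : Nat), r - l ≤ d → (∀ k, l ≤ k → k ≤ r → db.getD k "" = ".") →
      pvAltLoop db l r = db := by
  intro d
  induction d with
  | zero =>
    intro l r hd _; rw [pvAltLoop, dif_neg (by omega)]
  | succ d ih =>
    intro l r hd hdots
    rw [pvAltLoop]
    by_cases hlr : l < r
    · rw [dif_pos hlr, if_neg (not_not_intro (hdots l le_rfl (by omega))),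
        if_pos (hdots r (by omega) le_rfl)]
      exact ih l (r - 1) (by omega) (fun k hk hk' => hdots k hk (by omega))
    · rw [dif_neg hlr]

-- L4: the right pointer descends over dots
theorem pvAlt_descend (db : List String) :
    ∀ (d : Nat) (l r r' : Nat), r - l ≤ d → l ≤ r' → r' ≤ r →
      (∀ k, r' < k → k ≤ r → db.getD k "" = ".") →
      pvAltLoop db l r = pvAltLoop db l r' := by
  intro d
  induction d with
  | zero =>
    intro l r r' hd hlr' hr'r _
    have : r' = r := by omega
    rw [this]
  | succ d ih =>
    intro l r r' hd hlr' hr'r hdots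
    by_cases hrr' : r' = r
    · rw [hrr']
    · have hlr : l < r := by omega
      rw [pvAltLoop, dif_pos hlr]
      by_cases hfile : db.getD l "" ≠ "."
      · rw [if_pos hfile]
        by_cases hl : l < r'
        · rw [ih (l + 1) r r' (by omega) (by omega) (by omega) hdots]
          conv_rhs => rw [pvAltLoop]
          rw [dif_pos hl, if_pos hfile]
        · have hl' : l = r' := by omega
          rw [pvAlt_dots db (r - (l + 1)) (l + 1) r le_rfl
              (fun k hk hk' => hdots k (by omega) hk')]
          conv_rhs => rw [pvAltLoop]
          rw [dif_neg (by omega)]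
      · rw [if_neg hfile, if_pos (hdots r (by omega) le_rfl)]
        exact ih l (r - 1) r' (by omega) hlr' (by omega)
          (fun k hk hk' => hdots k hk (by omega))

-- getD after a double set, stated once for reuse
theorem pv_getD_set_set (db : List String) (g f k : Nat) (u v : String)
    (hg : g < db.length) (hf : f < db.length) :
    ((db.set g u).set f v).getD k "" =
      if k = f then v else if k = g then u else db.getD k "" := by
  simp only [List.getD_eq_getElem?_getD, List.getElem?_set]
  by_cases hkf : k = f
  · subst hkf; simp [hf, List.length_set]
  · by_cases hkg : k = g
    · subst hkg
      simp [hkf, Ne.symm hkf, hg]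
    · simp [hkf, hkg, Ne.symm hkf, Ne.symm hkg]

-- M1: moving the last file block into the first gap does not change B's result
theorem pvAlt_move (db : List String) (g f : Nat)
    (hgfiles : ∀ k, k < g → db.getD k "" ≠ ".")
    (hg : db.getD g "" = ".") (hgf : g < f) (hf : f < db.length)
    (hffile : db.getD f "" ≠ ".")
    (hdots : ∀ k, f < k → k < db.length → db.getD k "" = ".") :
    pvAltLoop db 0 (db.length - 1) =
      pvAltLoop ((db.set g (db.getD f "")).set f ".") 0 (db.length - 1) := by
  have hgl : g < db.length := by omega
  set db' := (db.set g (db.getD f "")).set f "." with hdb'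
  have hlen' : db'.length = db.length := by simp [hdb', List.length_set]
  have hget' : ∀ k, db'.getD k "" =
      if k = f then "." else if k = g then db.getD f "" else db.getD k "" := by
    intro k; exact pv_getD_set_set db g f k _ _ hgl hf
  -- LHS → altLoop db g f → one swap step
  have lhs1 : pvAltLoop db 0 (db.length - 1) = pvAltLoop db g (db.length - 1) := by
    have := pvAlt_climb db (db.length - 1) g 0 (by omega)
      (fun k hk hk' => hgfiles k (by omega))
    simpa using this
  have lhs2 : pvAltLoop db g (db.length - 1) = pvAltLoop db g f :=
    pvAlt_descend db (db.length - 1 - g) g (db.length - 1) f le_rfl (by omega) (by omega)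
      (fun k hk hk' => hdots k hk (by omega))
  have lhs3 : pvAltLoop db g f = pvAltLoop db' (g + 1) (f - 1) := by
    rw [pvAltLoop, dif_pos hgf, if_neg (not_not_intro hg), if_neg hffile, hg]
  -- RHS → altLoop db' (g+1) (f-1) as well
  have rhs1 : pvAltLoop db' 0 (db.length - 1) = pvAltLoop db' (g + 1) (db.length - 1) := by
    have := pvAlt_climb db' (db.length - 1) (g + 1) 0 (by omega)
      (fun k hk hk' => by
        rw [hget' k, if_neg (by omega : ¬ k = f)]
        by_cases hkg : k = g
        · rw [if_pos hkg]; exact hffile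
        · rw [if_neg hkg]; exact hgfiles k (by omega))
    simpa using this
  have hdots' : ∀ k, f - 1 < k → k ≤ db.length - 1 → db'.getD k "" = "." := by
    intro k hk hk'
    rw [hget' k]
    by_cases hkf : k = f
    · rw [if_pos hkf]
    · rw [if_neg hkf, if_neg (by omega : ¬ k = g)]
      exact hdots k (by omega) (by omega)
  by_cases hcase : g + 1 ≤ f - 1
  · have rhs2 : pvAltLoop db' (g + 1) (db.length - 1) = pvAltLoop db' (g + 1) (f - 1) :=
      pvAlt_descend db' (db.length - 1 - (g + 1)) (g + 1) (db.length - 1) (f - 1) le_rfl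
        hcase (by omega) hdots'
    rw [lhs1, lhs2, lhs3, rhs1, rhs2]
  · -- f = g + 1 : both sides are db'
    have hfg1 : f = g + 1 := by omega
    have lhsdone : pvAltLoop db' (g + 1) (f - 1) = db' := by
      rw [pvAltLoop, dif_neg (by omega)]
    have rhsdone : pvAltLoop db' (g + 1) (db.length - 1) = db' := by
      refine pvAlt_dots db' (db.length - 1 - (g + 1)) (g + 1) (db.length - 1) le_rfl ?_
      intro k hk hk'
      exact hdots' k (by omega) hk'
    rw [lhs1, lhs2, lhs3, lhsdone, rhs1, rhsdone]

-- L5: an already-compact disk (files [0,m], dots above) is a fixed point of B's loop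
theorem pvAlt_compact (db : List String) (m : Nat) (hm : m < db.length)
    (hfiles : ∀ k, k ≤ m → db.getD k "" ≠ ".")
    (hdots : ∀ k, m < k → k < db.length → db.getD k "" = ".") :
    pvAltLoop db 0 (db.length - 1) = db := by
  by_cases hend : m = db.length - 1
  · have h1 : pvAltLoop db 0 (db.length - 1) = pvAltLoop db (db.length - 1) (db.length - 1) := by
      have := pvAlt_climb db (db.length - 1) (db.length - 1) 0 (by omega)
        (fun k hk hk' => hfiles k (by omega))
      simpa using this
    rw [h1, pvAltLoop, dif_neg (by omega)]
  · have hm1 : m + 1 ≤ db.length - 1 := by omega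
    have h1 : pvAltLoop db 0 (db.length - 1) = pvAltLoop db (m + 1) (db.length - 1) := by
      have := pvAlt_climb db (db.length - 1) (m + 1) 0 (by omega)
        (fun k hk hk' => hfiles k (by omega))
      simpa using this
    rw [h1]
    exact pvAlt_dots db (db.length - 1 - (m + 1)) (m + 1) (db.length - 1) le_rfl
      (fun k hk hk' => hdots k (by omega) (by omega))

-- IS: the inner scan skips over file blocks left of i
theorem pvInner_skip (i : Nat) (db : List String) :
    ∀ (k a : Nat) (rest : List Nat),
      (∀ j, a ≤ j → j < a + k → db.getD j "" ≠ "." ∧ j < i) →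
      pvInnerA i db (List.range' a k ++ rest) = pvInnerA i db rest := by
  intro k
  induction k with
  | zero => intro a rest _; rfl
  | succ k ih =>
    intro a rest h
    rw [List.range'_succ, List.cons_append, pvInnerA]
    have h0 := h a le_rfl (by omega)
    rw [if_neg h0.1, if_neg (by omega)]
    exact ih (a + 1) rest (fun j hj hj' => h j (by omega) (by omega))

-- IL: once db[i] is a dot and everything from i on is dots, the scan is a no-op fallthrough
theorem pvInner_noop (i : Nat) :
    ∀ (js : List Nat) (db : List String), (∀ j ∈ js, j < db.length) →
      db.getD i "" = "." →
      (∀ k, i ≤ k → k < db.length → db.getD k "" = ".") →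
      pvInnerA i db js = .inl db := by
  intro js
  induction js with
  | nil => intro db _ _ _; rfl
  | cons j rest ih =>
    intro db hbound hi hdots
    rw [pvInnerA]
    by_cases hj : db.getD j "" = "."
    · rw [if_pos hj]
      have hjl : j < db.length := hbound j (by simp)
      have hil : i < db.length := by
        by_contra h
        have : db.getD i "" = "" := by
          rw [List.getD_eq_getElem?_getD,
            List.getElem?_eq_none (by omega : db.length ≤ i)]
          rfl
        rw [this] at hi; exact absurd hi (by decide)
      have e1 : db.set j (db.getD i "") = db := by
        rw [hi]; exact pv_set_self db j "." hj hjl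
      have e2 : db.set i "." = db := pv_set_self db i "." hi hil
      rw [e1, e2]
      exact ih db (fun x hx => hbound x (List.mem_cons_of_mem _ hx)) hi hdots
    · have hji : ¬ i ≤ j := by
        intro hle
        exact hj (hdots j hle (hbound j (by simp)))
      rw [if_neg hj, if_neg hji]
      exact ih db (fun x hx => hbound x (by simp [hx])) hi hdots

-- Fact B: no gap below a file block at i ⇒ the scan returns the disk unchanged
theorem pvInner_return (i : Nat) (db : List String) (hi : i < db.length)
    (hfiles : ∀ j, j < i → db.getD j "" ≠ ".") (hifile : db.getD i "" ≠ ".") :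
    pvInnerA i db (List.range db.length) = .inr db := by
  have hsplit : List.range db.length = List.range' 0 i ++ List.range' i (db.length - i) := by
    rw [List.range_eq_range']
    have := @List.range'_append 0 i (db.length - i) 1
    simp at this
    rw [(by omega : db.length = i + (db.length - i)), ← this]
    congr 2
    omega
  rw [hsplit, pvInner_skip i db i 0 _ (fun j hj hj' => ⟨hfiles j (by omega), by omega⟩)]
  have : db.length - i = (db.length - i - 1) + 1 := by omega
  rw [this, List.range'_succ, pvInnerA, if_neg hifile, if_pos le_rfl]

-- Fact A: a first gap g below the file at i ⇒ the scan moves db[i] there and falls through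
theorem pvInner_move (i g : Nat) (db : List String) (hi : i < db.length)
    (hgi : g < i) (hg : db.getD g "" = ".")
    (hgfiles : ∀ j, j < g → db.getD j "" ≠ ".")
    (hdots : ∀ k, i < k → k < db.length → db.getD k "" = ".") :
    pvInnerA i db (List.range db.length) = .inl ((db.set g (db.getD i "")).set i ".") := by
  have hgl : g < db.length := by omega
  have hsplit : List.range db.length =
      List.range' 0 g ++ g :: List.range' (g + 1) (db.length - g - 1) := by
    rw [List.range_eq_range']
    have := @List.range'_append 0 g (db.length - g) 1
    simp at this
    rw [(by omega : db.length = g + (db.length - g)), ← this]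
    congr 1
    rw [(by omega : g + (db.length - g) = db.length),
      (by omega : db.length - g = (db.length - g - 1) + 1), List.range'_succ]
    simp
  rw [hsplit, pvInner_skip i db g 0 _ (fun j hj hj' => ⟨hgfiles j (by omega), by omega⟩)]
  rw [pvInnerA, if_pos hg]
  set db2 := (db.set g (db.getD i "")).set i "." with hdb2
  have hlen2 : db2.length = db.length := by simp [hdb2, List.length_set]
  have hget2 : ∀ k, db2.getD k "" =
      if k = i then "." else if k = g then db.getD i "" else db.getD k "" := by
    intro k; exact pv_getD_set_set db g i k _ _ hgl hi
  refine pvInner_noop i _ db2 ?_ ?_ ?_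
  · intro j hj
    rw [hlen2]
    have := List.mem_range'.mp hj
    omega
  · rw [hget2 i, if_pos rfl]
  · intro k hk hkl
    rw [hget2 k]
    by_cases hki : k = i
    · rw [if_pos hki]
    · rw [if_neg hki, if_neg (by omega : ¬ k = g)]
      exact hdots k (by omega) (by rw [hlen2] at hkl; omega)

-- the all-dots condition in index form
theorem pv_alldots_iff (db : List String) :
    (∀ b ∈ db, b = ".") ↔ (∀ k, k < db.length → db.getD k "" = ".") := by
  constructor
  · intro h k hk
    rw [List.getD_eq_getElem?_getD, List.getElem?_eq_getElem hk]
    exact h _ (List.getElem_mem hk)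
  · intro h b hb
    obtain ⟨k, hk, rfl⟩ := List.mem_iff_getElem.mp hb
    have := h k hk
    rwa [List.getD_eq_getElem?_getD, List.getElem?_eq_getElem hk] at this

-- MAIN: A's outer loop, run from index m-1 down, with everything from m on already dots
theorem pvOuter_main :
    ∀ (m : Nat) (db : List String), m ≤ db.length →
      (∀ k, m ≤ k → k < db.length → db.getD k "" = ".") →
      pvOuterA db (pvRevRange m) =
        if ∀ k, k < db.length → db.getD k "" = "." then none
        else some (pvAltLoop db 0 (db.length - 1)) := by
  intro m
  induction m with
  | zero =>
    intro db _ hdots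
    rw [pvRevRange, pvOuterA, if_pos (fun k hk => hdots k (by omega) hk)]
  | succ m ih =>
    intro db hm hdots
    rw [pvRevRange, pvOuterA]
    by_cases hfm : db.getD m "" = "."
    · rw [if_neg (by simpa using hfm)]
      have := ih db (by omega) (fun k hk hkl => by
        rcases Nat.eq_or_lt_of_le hk with h | h
        · rwa [← h]
        · exact hdots k (by omega) hkl)
      exact this
    · rw [if_pos (by simpa using hfm)]
      have hnotall : ¬ (∀ k, k < db.length → db.getD k "" = ".") := by
        intro h; exact hfm (h m (by omega))
      by_cases hgap : ∃ k, k < m ∧ db.getD k "" = "."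
      · -- first gap g
        have hgapd : ∃ k, k < m ∧ db.getD k "" = "." := hgap
        classical
        let g := Nat.find hgapd
        have hgprop : g < m ∧ db.getD g "" = "." := Nat.find_spec hgapd
        have hgmin : ∀ j, j < g → db.getD j "" ≠ "." := by
          intro j hj hdot
          exact Nat.find_min hgapd hj ⟨by omega, hdot⟩
        have hinner := pvInner_move m g db (by omega) hgprop.1 hgprop.2 hgmin
          (fun k hk hkl => hdots k (by omega) hkl)
        rw [hinner]
        set db' := (db.set g (db.getD m "")).set m "." with hdb'
        have hlen' : db'.length = db.length := by simp [hdb', List.length_set]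
        have hget' : ∀ k, db'.getD k "" =
            if k = m then "." else if k = g then db.getD m "" else db.getD k "" := by
          intro k; exact pv_getD_set_set db g m k _ _ (by omega) (by omega)
        have hIH := ih db' (by omega) (fun k hk hkl => by
          rw [hget' k]
          by_cases hkm : k = m
          · rw [if_pos hkm]
          · rw [if_neg hkm, if_neg (by have := hgprop.1; omega : ¬ k = g)]
            exact hdots k (by omega) (by rw [hlen'] at hkl; omega))
        have hnotall' : ¬ (∀ k, k < db.length → db'.getD k "" = ".") := by
          intro h
          have := h g (by have := hgprop.1; omega)
          rw [hget' g, if_neg (by have := hgprop.1; omega : ¬ g = m), if_pos rfl] at this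
          exact hfm this
        have hmove := pvAlt_move db g m hgmin hgprop.2 hgprop.1 (by omega) hfm
          (fun k hk hkl => hdots k (by omega) hkl)
        show pvOuterA db' (pvRevRange m) = _
        rw [hIH, hlen', if_neg hnotall', if_neg hnotall, hmove, ← hdb']
      · -- no gap below m: A returns the disk; it is already compact
        push Not at hgap
        have hinner := pvInner_return m db (by omega)
          (fun j hj => hgap j hj) hfm
        rw [hinner, if_neg hnotall]
        show some db = some (pvAltLoop db 0 (db.length - 1))
        congr 1
        exact (pvAlt_compact db m (by omega)
          (fun k hk hkl => by
            rcases Nat.eq_or_lt_of_le hk with h | h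
            · exact hfm (h ▸ hkl)
            · exact hgap k h hkl)
          (fun k hk hkl => hdots k (by omega) hkl)).symm

-- A returns none on an all-dots disk
theorem pvOuter_none :
    ∀ (m : Nat) (db : List String), m ≤ db.length →
      (∀ k, k < db.length → db.getD k "" = ".") →
      pvOuterA db (pvRevRange m) = none := by
  intro m
  induction m with
  | zero => intro db _ _; rfl
  | succ m ih =>
    intro db hm hdots
    rw [pvRevRange, pvOuterA, if_neg (not_not_intro (hdots m (by omega)))]
    exact ih db (by omega) hdots

-- ===== VERDICT (by name: the statement is the Claim_ definition above) =====
theorem compact_disk_spec : Claim_unchanged_compact_disk := by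
  intro db _hdom hnd
  unfold compact_disk compact_disk_alt
  rw [pvOuter_main db.length db le_rfl (fun k hk hkl => by omega)]
  rw [if_neg (fun h => hnd ((pv_alldots_iff db).mpr h))]

theorem compact_disk_changed : Claim_changed_compact_disk := by
  unfold Claim_changed_compact_disk
  refine ⟨by decide, by decide, by decide, ?_, by decide⟩
  show compact_disk_alt ["."] = some ["."]
  unfold compact_disk_alt
  rw [pvAltLoop]
  rfl

theorem compact_disk_tight : Claim_exact_compact_disk := by
  intro db _hdom hd
  unfold compact_disk compact_disk_alt
  rw [pvOuter_none db.length db le_rfl ((pv_alldots_iff db).mp hd)]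
  simp
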